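-- pv_equiv track=rewrite | github.com/NavchetanKaur/local_tool | transplanttoolbox/ancillary_funcs.py | group_allele_codes_per_locus
-- ===== SOURCE A (Python) =====
-- def group_allele_codes_per_locus(donor_typing_list, donor_bws_string):
-- 	donor_a_alleles = []
-- 	donor_b_alleles = []
-- 	donor_c_alleles = []
-- 	donor_dr_alleles = []
-- 	donor_dq_alleles = []
--
--
-- 	for i in donor_typing_list:
-- 		locus = i.split("*")[0]
-- 		if locus == "A":
-- 			donor_a_alleles.append(i)
--
-- 		if locus == "B":
-- 			donor_b_alleles.append(i)
--
-- 		if locus == "C":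
-- 			donor_c_alleles.append(i)
--
-- 		if (locus == "DRB1") or (locus == "DRB3") or (locus == "DRB4") or (locus == "DRB5"):
-- 			donor_dr_alleles.append(i)
--
-- 		if (locus == "DQB1") or (locus == "DQA1"):
-- 			donor_dq_alleles.append(i)
--
-- 	bw_string = donor_bws_string
--
-- 	final_typing_list = [", ".join(sorted(donor_a_alleles))] + [", ".join(sorted(donor_b_alleles))] + [bw_string] + [", ".join(sorted(donor_c_alleles))] + [", ".join(sorted(donor_dr_alleles))] + [", ".join(sorted(donor_dq_alleles))]
--
-- 	return final_typing_list
-- ===== SOURCE B (Python) =====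
-- A_LOCI = frozenset({"A"})
-- B_LOCI = frozenset({"B"})
-- C_LOCI = frozenset({"C"})
-- DR_LOCI = frozenset({"DRB1", "DRB3", "DRB4", "DRB5"})
-- DQ_LOCI = frozenset({"DQB1", "DQA1"})
--
--
-- def _bucket(typing_list, loci):
--     return ", ".join(sorted(x for x in typing_list if x.split("*")[0] in loci))
--
--
-- def group_allele_codes_per_locus(donor_typing_list, donor_bws_string):
--     return [
--         _bucket(donor_typing_list, A_LOCI),
--         _bucket(donor_typing_list, B_LOCI),
--         donor_bws_string,
--         _bucket(donor_typing_list, C_LOCI),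
--         _bucket(donor_typing_list, DR_LOCI),
--         _bucket(donor_typing_list, DQ_LOCI),
--     ]
-- ===== Notes on version B (the rewrite author's own statement) =====
-- stated objective: idiomatic
-- what changed: Replaces the single loop with five mutable accumulator lists by per-locus-group membership sets and one filter-sort-join bucket helper applied six times to assemble the result directly.
import Mathlib
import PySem

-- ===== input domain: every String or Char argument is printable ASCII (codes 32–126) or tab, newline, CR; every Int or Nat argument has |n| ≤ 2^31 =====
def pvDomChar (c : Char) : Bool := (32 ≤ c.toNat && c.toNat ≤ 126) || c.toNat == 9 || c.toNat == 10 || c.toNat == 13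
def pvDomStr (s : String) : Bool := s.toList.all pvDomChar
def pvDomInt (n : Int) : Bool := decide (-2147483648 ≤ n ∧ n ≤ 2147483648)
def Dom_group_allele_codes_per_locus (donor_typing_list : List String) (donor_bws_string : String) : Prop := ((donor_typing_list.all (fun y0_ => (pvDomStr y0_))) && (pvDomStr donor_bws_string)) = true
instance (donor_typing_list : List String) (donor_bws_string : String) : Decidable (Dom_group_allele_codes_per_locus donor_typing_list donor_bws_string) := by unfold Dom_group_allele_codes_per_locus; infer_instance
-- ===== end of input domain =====

-- B replaces A's five-accumulator single loop by per-group membership sets and one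
-- filter-sort-join bucket helper applied per slot (idiomatic; same return value).

-- shared helper: i.split("*")[0]  (splitOn always returns a nonempty list, so headD is exact)
def pvLocus (i : String) : String := ((PySem.Str.split? i "*").getD []).headD ""

-- ===== PORT A =====
def pvStep (st : List String × List String × List String × List String × List String) (i : String) : List String × List String × List String × List String × List String :=
  let locus := pvLocus i
  let a := if locus == "A" then st.1 ++ [i] else st.1
  let b := if locus == "B" then st.2.1 ++ [i] else st.2.1
  let c := if locus == "C" then st.2.2.1 ++ [i] else st.2.2.1
  let dr := if locus == "DRB1" || locus == "DRB3" || locus == "DRB4" || locus == "DRB5" then st.2.2.2.1 ++ [i] else st.2.2.2.1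
  let dq := if locus == "DQB1" || locus == "DQA1" then st.2.2.2.2 ++ [i] else st.2.2.2.2
  (a, b, c, dr, dq)

def group_allele_codes_per_locus (donor_typing_list : List String) (donor_bws_string : String) : List String :=
  let st := donor_typing_list.foldl pvStep ([], [], [], [], [])
  let bw_string := donor_bws_string
  [PySem.Str.join ", " (PySem.List.sorted st.1 (fun x => x) false)]
    ++ [PySem.Str.join ", " (PySem.List.sorted st.2.1 (fun x => x) false)]
    ++ [bw_string]
    ++ [PySem.Str.join ", " (PySem.List.sorted st.2.2.1 (fun x => x) false)]
    ++ [PySem.Str.join ", " (PySem.List.sorted st.2.2.2.1 (fun x => x) false)]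
    ++ [PySem.Str.join ", " (PySem.List.sorted st.2.2.2.2 (fun x => x) false)]

-- ===== PORT B =====
def pvBucket (typing_list : List String) (loci : List String) : String :=
  PySem.Str.join ", " (PySem.List.sorted (typing_list.filter (fun x => loci.contains (pvLocus x))) (fun x => x) false)

def group_allele_codes_per_locus_alt (donor_typing_list : List String) (donor_bws_string : String) : List String :=
  [ pvBucket donor_typing_list ["A"]
  , pvBucket donor_typing_list ["B"]
  , donor_bws_string
  , pvBucket donor_typing_list ["C"]
  , pvBucket donor_typing_list ["DRB1", "DRB3", "DRB4", "DRB5"]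
  , pvBucket donor_typing_list ["DQB1", "DQA1"] ]

-- ===== PRECONDITION & SPEC =====
def Spec_group_allele_codes_per_locus (donor_typing_list : List String) (donor_bws_string : String) (out : List String) : Prop := out = group_allele_codes_per_locus_alt donor_typing_list donor_bws_string
instance (donor_typing_list : List String) (donor_bws_string : String) (out : List String) : Decidable (Spec_group_allele_codes_per_locus donor_typing_list donor_bws_string out) := by unfold Spec_group_allele_codes_per_locus; infer_instance

-- ===== CLAIM (what is proved, stated in full; the proofs are below) =====
def Claim_equal_group_allele_codes_per_locus : Prop := ∀ (donor_typing_list : List String) (donor_bws_string : String), Dom_group_allele_codes_per_locus donor_typing_list donor_bws_string → Spec_group_allele_codes_per_locus donor_typing_list donor_bws_string (group_allele_codes_per_locus donor_typing_list donor_bws_string)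

-- ===== LEMMAS AND PROOFS =====

-- the five accumulators of A's fold are the five filters of B
theorem pvFold5 (tl : List String) :
    ∀ a b c dr dq : List String,
      tl.foldl pvStep (a, b, c, dr, dq)
      = ( a ++ tl.filter (fun x => (["A"] : List String).contains (pvLocus x))
        , b ++ tl.filter (fun x => (["B"] : List String).contains (pvLocus x))
        , c ++ tl.filter (fun x => (["C"] : List String).contains (pvLocus x))
        , dr ++ tl.filter (fun x => (["DRB1", "DRB3", "DRB4", "DRB5"] : List String).contains (pvLocus x))
        , dq ++ tl.filter (fun x => (["DQB1", "DQA1"] : List String).contains (pvLocus x)) ) := by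
  induction tl with
  | nil => intro a b c dr dq; simp
  | cons x xs ih =>
    intro a b c dr dq
    simp only [List.foldl_cons, List.filter_cons, pvStep, ih, List.contains_cons,
      List.contains_nil, Bool.or_false, Prod.mk.injEq]
    refine ⟨?_, ?_, ?_, ?_, ?_⟩ <;>
      · split <;> rename_i h <;> simp_all [List.append_assoc] <;> tauto

theorem group_allele_codes_per_locus_eq (tl : List String) (bw : String) :
    group_allele_codes_per_locus tl bw = group_allele_codes_per_locus_alt tl bw := by
  unfold group_allele_codes_per_locus group_allele_codes_per_locus_alt pvBucket
  rw [pvFold5 tl [] [] [] [] []]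
  simp

-- ===== VERDICT (by name: the statement is the Claim_ definition above) =====
theorem group_allele_codes_per_locus_spec : Claim_equal_group_allele_codes_per_locus := by
  intro tl bw _
  exact group_allele_codes_per_locus_eq tl bw
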